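-- pv_equiv track=rewrite | github.com/cy-cus/hackwithAI | reconai/utils/llm_chunker.py | _get_suspicious_endpoints
-- ===== SOURCE A (Python) =====
-- from typing import List, Dict, Any
--
-- def _get_suspicious_endpoints(endpoints: List[Dict]) -> List[Dict]:
--     """Filter suspicious endpoints."""
--     suspicious_patterns = [
--         'admin', 'debug', 'test', 'backup', 'config',
--         'api/internal', 'api/admin', '.env', '.git',
--         'phpinfo', 'upload', 'delete', 'sql'
--     ]
--
--     suspicious = []
--     for endpoint in endpoints:
--         url = endpoint.get('url', '').lower()
--         if any(pattern in url for pattern in suspicious_patterns):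
--             suspicious.append(endpoint)
--
--     return suspicious
-- ===== SOURCE B (Python) =====
-- from typing import List, Dict, Any
--
-- _PATTERNS = [
--     'admin', 'debug', 'test', 'backup', 'config',
--     'api/internal', 'api/admin', '.env', '.git',
--     'phpinfo', 'upload', 'delete', 'sql'
-- ]
--
-- # first-character dispatch table, built once
-- _BY_FIRST = {}
-- for _p in _PATTERNS:
--     _BY_FIRST.setdefault(_p[0], []).append(_p)
--
--
-- def _hit(url):
--     # one left-to-right scan; at each position only the patterns whose
--     # first character matches are tried
--     for i, c in enumerate(url):
--         for p in _BY_FIRST.get(c, ()):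
--             if url.startswith(p, i):
--                 return True
--     return False
--
--
-- def _get_suspicious_endpoints(endpoints: List[Dict]) -> List[Dict]:
--     return [e for e in endpoints if _hit(e.get('url', '').lower())]
-- ===== Notes on version B (the rewrite author's own statement) =====
-- stated objective: alternative
-- what changed: A tests all 13 suspicious substrings against each URL with any(pattern in url ...); B scans each lowered URL once left-to-right and at each position tries only the patterns whose first character matches, via a first-character dispatch table built once, returning a list comprehension filter.
import Mathlib
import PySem

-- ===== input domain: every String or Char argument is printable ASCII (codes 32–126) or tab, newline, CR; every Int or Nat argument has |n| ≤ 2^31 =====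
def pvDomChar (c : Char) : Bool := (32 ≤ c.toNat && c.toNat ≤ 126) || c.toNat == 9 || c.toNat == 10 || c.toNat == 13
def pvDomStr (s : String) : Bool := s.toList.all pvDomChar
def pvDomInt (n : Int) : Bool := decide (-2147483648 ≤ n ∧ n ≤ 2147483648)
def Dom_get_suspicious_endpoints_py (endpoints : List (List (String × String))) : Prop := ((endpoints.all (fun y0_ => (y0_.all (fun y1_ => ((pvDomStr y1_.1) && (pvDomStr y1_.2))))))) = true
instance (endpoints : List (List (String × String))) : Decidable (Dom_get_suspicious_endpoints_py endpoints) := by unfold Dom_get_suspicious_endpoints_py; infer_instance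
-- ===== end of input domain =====

-- B replaces A's 13-substring-tests-per-URL inner any() by ONE left-to-right scan of each
-- URL with a first-character dispatch table (objective: alternative matching algorithm).

-- ===== PORT A =====
-- A: for each endpoint, url = endpoint.get('url','').lower(); keep it if any of the 13
-- patterns occurs in url; appended via a foldl accumulator, like A's loop.
def get_suspicious_endpoints_py (endpoints : List (List (String × String))) : List (List (String × String)) :=
  let suspicious_patterns : List String :=
    ["admin", "debug", "test", "backup", "config",
     "api/internal", "api/admin", ".env", ".git",
     "phpinfo", "upload", "delete", "sql"]
  endpoints.foldl (fun suspicious endpoint =>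
    let url := PySem.Str.lower ((PySem.Dict.mk endpoint).getD "url" "")
    if suspicious_patterns.any (fun pattern => PySem.Str.isIn pattern url) then
      suspicious ++ [endpoint]
    else suspicious) []

-- ===== PORT B =====
-- the module-level pattern list of Source B
def pvPats : List String :=
  ["admin", "debug", "test", "backup", "config",
   "api/internal", "api/admin", ".env", ".git",
   "phpinfo", "upload", "delete", "sql"]

-- Source B's _BY_FIRST: by_first.setdefault(p[0], []).append(p), ported as Dict.modify
-- (exact: every pattern is nonempty, so p[0] = headD; append to the default-[] bucket)
def pvByFirst : PySem.Dict Char (List String) :=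
  pvPats.foldl (fun d p => d.modify (p.toList.headD ' ') [] (· ++ [p])) PySem.Dict.empty

-- Source B's _hit: enumerate(url) with url.startswith(p, i); ported as structural recursion on
-- the suffix (exact: url.startswith(p, i) is startswith on the i-th suffix, and the
-- recursion visits the suffixes in enumerate order)
def pvHit : List Char → Bool
  | [] => false
  | c :: rest =>
      ((pvByFirst.getD c []).any fun p => PySem.Chars.startswith (c :: rest) p.toList) ||
        pvHit rest

def get_suspicious_endpoints_py_alt (endpoints : List (List (String × String))) : List (List (String × String)) :=
  endpoints.filter (fun e => pvHit (PySem.Str.lower ((PySem.Dict.mk e).getD "url" "")).toList)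

-- ===== PRECONDITION & SPEC =====
def Spec_get_suspicious_endpoints_py (endpoints : List (List (String × String))) (out : List (List (String × String))) : Prop := out = get_suspicious_endpoints_py_alt endpoints
instance (endpoints : List (List (String × String))) (out : List (List (String × String))) : Decidable (Spec_get_suspicious_endpoints_py endpoints out) := by unfold Spec_get_suspicious_endpoints_py; infer_instance

-- ===== CLAIM (what is proved, stated in full; the proofs are below) =====
def Claim_equal_get_suspicious_endpoints_py : Prop := ∀ (endpoints : List (List (String × String))), Dom_get_suspicious_endpoints_py endpoints → Spec_get_suspicious_endpoints_py endpoints (get_suspicious_endpoints_py endpoints)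

-- ===== LEMMAS AND PROOFS =====
theorem pvStartswithCons (c : Char) (t : List Char) (p : Char) (ps : List Char) :
    PySem.Chars.startswith (c :: t) (p :: ps) = ((c == p) && PySem.Chars.startswith t ps) := by
  simp [PySem.Chars.startswith, List.isPrefixOf, BEq.comm]

-- the bucket pvByFirst.getD c [] tries exactly the patterns that can start at a position
-- whose character is c
theorem pvDispatch (c : Char) (t : List Char) :
    ((pvByFirst.getD c []).any fun p => PySem.Chars.startswith (c :: t) p.toList)
      = (pvPats.any fun p => PySem.Chars.startswith (c :: t) p.toList) := by
  have hB : pvByFirst = PySem.Dict.mk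
      [('a', ["admin", "api/internal", "api/admin"]), ('d', ["debug", "delete"]),
       ('t', ["test"]), ('b', ["backup"]), ('c', ["config"]), ('.', [".env", ".git"]),
       ('p', ["phpinfo"]), ('u', ["upload"]), ('s', ["sql"])] := by decide
  rw [hB]
  by_cases h1 : c = 'a'
  · subst c; simp [pvPats, PySem.Dict.getD_eq_get?_getD, PySem.Dict.get?_mk_cons, pvStartswithCons]
  by_cases h2 : c = 'd'
  · subst c; simp [pvPats, PySem.Dict.getD_eq_get?_getD, PySem.Dict.get?_mk_cons, pvStartswithCons]
  by_cases h3 : c = 't'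
  · subst c; simp [pvPats, PySem.Dict.getD_eq_get?_getD, PySem.Dict.get?_mk_cons, pvStartswithCons]
  by_cases h4 : c = 'b'
  · subst c; simp [pvPats, PySem.Dict.getD_eq_get?_getD, PySem.Dict.get?_mk_cons, pvStartswithCons]
  by_cases h5 : c = 'c'
  · subst c; simp [pvPats, PySem.Dict.getD_eq_get?_getD, PySem.Dict.get?_mk_cons, pvStartswithCons]
  by_cases h6 : c = '.'
  · subst c; simp [pvPats, PySem.Dict.getD_eq_get?_getD, PySem.Dict.get?_mk_cons, pvStartswithCons]
  by_cases h7 : c = 'p'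
  · subst c; simp [pvPats, PySem.Dict.getD_eq_get?_getD, PySem.Dict.get?_mk_cons, pvStartswithCons]
  by_cases h8 : c = 'u'
  · subst c; simp [pvPats, PySem.Dict.getD_eq_get?_getD, PySem.Dict.get?_mk_cons, pvStartswithCons]
  by_cases h9 : c = 's'
  · subst c; simp [pvPats, PySem.Dict.getD_eq_get?_getD, PySem.Dict.get?_mk_cons, pvStartswithCons]
  have e1 : (('a':Char) == c) = false := beq_eq_false_iff_ne.mpr (Ne.symm h1)
  have f1 : (c == ('a':Char)) = false := beq_eq_false_iff_ne.mpr h1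
  have e2 : (('d':Char) == c) = false := beq_eq_false_iff_ne.mpr (Ne.symm h2)
  have f2 : (c == ('d':Char)) = false := beq_eq_false_iff_ne.mpr h2
  have e3 : (('t':Char) == c) = false := beq_eq_false_iff_ne.mpr (Ne.symm h3)
  have f3 : (c == ('t':Char)) = false := beq_eq_false_iff_ne.mpr h3
  have e4 : (('b':Char) == c) = false := beq_eq_false_iff_ne.mpr (Ne.symm h4)
  have f4 : (c == ('b':Char)) = false := beq_eq_false_iff_ne.mpr h4
  have e5 : (('c':Char) == c) = false := beq_eq_false_iff_ne.mpr (Ne.symm h5)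
  have f5 : (c == ('c':Char)) = false := beq_eq_false_iff_ne.mpr h5
  have e6 : (('.':Char) == c) = false := beq_eq_false_iff_ne.mpr (Ne.symm h6)
  have f6 : (c == ('.':Char)) = false := beq_eq_false_iff_ne.mpr h6
  have e7 : (('p':Char) == c) = false := beq_eq_false_iff_ne.mpr (Ne.symm h7)
  have f7 : (c == ('p':Char)) = false := beq_eq_false_iff_ne.mpr h7
  have e8 : (('u':Char) == c) = false := beq_eq_false_iff_ne.mpr (Ne.symm h8)
  have f8 : (c == ('u':Char)) = false := beq_eq_false_iff_ne.mpr h8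
  have e9 : (('s':Char) == c) = false := beq_eq_false_iff_ne.mpr (Ne.symm h9)
  have f9 : (c == ('s':Char)) = false := beq_eq_false_iff_ne.mpr h9
  simp [pvPats, PySem.Dict.getD_eq_get?_getD, PySem.Dict.get?, pvStartswithCons,
        e1, e2, e3, e4, e5, e6, e7, e8, e9, f1, f2, f3, f4, f5, f6, f7, f8, f9]

theorem pvAnyOr {α : Type} (l : List α) (f g : α → Bool) :
    l.any (fun x => f x || g x) = (l.any f || l.any g) := by
  induction l with
  | nil => rfl
  | cons a t ih => simp only [List.any_cons, ih]; ac_rfl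

theorem pvIsInCons (sub : List Char) (c : Char) (t : List Char) :
    PySem.Chars.isIn sub (c :: t)
      = (PySem.Chars.startswith (c :: t) sub || PySem.Chars.isIn sub t) := by
  rw [Bool.eq_iff_iff]
  simp [PySem.Chars.isIn_iff_infix, PySem.Chars.startswith_iff, List.infix_cons_iff]

-- B's single scan finds a hit iff some pattern occurs as a substring
theorem pvHit_eq (cs : List Char) :
    pvHit cs = pvPats.any (fun p => PySem.Chars.isIn p.toList cs) := by
  induction cs with
  | nil => decide
  | cons c t ih =>
      rw [pvHit, pvDispatch, ih]
      simp only [pvIsInCons, pvAnyOr]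

-- ===== VERDICT (by name: the statement is the Claim_ definition above) =====
theorem get_suspicious_endpoints_py_spec : Claim_equal_get_suspicious_endpoints_py := by
  intro endpoints _
  unfold Spec_get_suspicious_endpoints_py get_suspicious_endpoints_py get_suspicious_endpoints_py_alt
  rw [PySem.List.foldl_append_if]
  simp only [List.nil_append, List.map_id']
  apply List.filter_congr
  intro e _
  rw [pvHit_eq]
  simp [pvPats]
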